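-- pv_equiv track=rewrite | github.com/Artem-Vorobiov/Leetcode_Practice | 2_Prefix Sum/minStartValue.py | minStartValue
-- ===== SOURCE A (Python) =====
-- def minStartValue(nums):
--     """
--     :type nums: List[int]
--     :rtype: int
--     """
--     startValue = 1
--     while True:
--         prefix = [startValue]
--         for i in range(1, (len(nums)+1)):
--             if (prefix[i-1]+nums[i-1]) < 1:
--                 break
--             else:
--                 prefix.append(prefix[i-1]+nums[i-1])
--
--         if (len(nums)+1) == len(prefix):
--             return startValue
--
--         startValue += 1
-- ===== SOURCE B (Python) =====
-- def minStartValue(nums):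
--     """
--     :type nums: List[int]
--     :rtype: int
--     """
--     s = 0
--     m = 0
--     for x in nums:
--         s += x
--         if s < m:
--             m = s
--     return max(1, 1 - m)
-- ===== Notes on version B (the rewrite author's own statement) =====
-- stated objective: faster
-- what changed: replaced A's retry loop (try startValue=1,2,3,... rebuilding the whole prefix list each time) with a single pass tracking the minimum prefix sum, returning max(1, 1-min)
import Mathlib
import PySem

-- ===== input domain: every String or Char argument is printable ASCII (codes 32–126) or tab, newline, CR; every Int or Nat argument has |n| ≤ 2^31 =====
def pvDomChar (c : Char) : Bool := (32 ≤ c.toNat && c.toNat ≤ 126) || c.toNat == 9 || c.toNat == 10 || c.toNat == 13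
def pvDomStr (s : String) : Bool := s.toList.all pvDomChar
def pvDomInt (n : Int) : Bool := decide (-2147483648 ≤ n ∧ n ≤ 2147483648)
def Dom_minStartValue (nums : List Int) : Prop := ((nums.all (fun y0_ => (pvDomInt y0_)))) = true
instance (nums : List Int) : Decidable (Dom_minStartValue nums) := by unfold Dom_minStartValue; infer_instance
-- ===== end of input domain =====

-- B replaces A's retry loop (try startValue = 1, 2, 3, … rebuilding the prefix list each time)
-- with one pass tracking the minimum prefix sum: answer = max 1 (1 - minPrefix).

-- ===== PORT A =====
-- the inner 'for i in range(1, len(nums)+1)' loop of A: extends the prefix list, stops ('break')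
-- as soon as prefix[i-1]+nums[i-1] < 1
def pvInner (acc : List Int) (last : Int) : List Int → List Int
  | [] => acc
  | x :: xs => if last + x < 1 then acc else pvInner (acc ++ [last + x]) (last + x) xs

-- helpers used only by the termination argument of the outer loop (and by the proofs below)
def pvOk (last : Int) : List Int → Prop
  | [] => True
  | x :: xs => 1 ≤ last + x ∧ pvOk (last + x) xs

-- minimum of 0 and all nonempty prefix sums (= the state B's single pass maintains)
def pvMin (nums : List Int) : Int :=
  (nums.foldl (fun (p : Int × Int) x =>
    (p.1 + x, if p.1 + x < p.2 then p.1 + x else p.2)) (0, 0)).2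

theorem pvInner_len (nums : List Int) : ∀ (acc : List Int) (last : Int),
    (pvInner acc last nums).length = acc.length + nums.length ↔ pvOk last nums := by
  induction nums with
  | nil => intro acc last; simp [pvInner, pvOk]
  | cons x xs ih =>
    intro acc last
    simp only [pvInner, pvOk]
    split
    · rename_i h
      simp only [List.length_cons]
      constructor
      · intro hl; omega
      · rintro ⟨h1, -⟩; omega
    · rename_i h
      have hih := ih (acc ++ [last + x]) (last + x)
      simp only [List.length_append, List.length_cons, List.length_nil] at hih ⊢
      constructor
      · intro hk; exact ⟨by omega, hih.mp (by omega)⟩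
      · rintro ⟨-, hk⟩; have := hih.mpr hk; omega

theorem pvMin_fold (nums : List Int) : ∀ (start s m : Int),
    (1 ≤ start + (nums.foldl (fun (p : Int × Int) x =>
      (p.1 + x, if p.1 + x < p.2 then p.1 + x else p.2)) (s, m)).2)
    ↔ (1 ≤ start + m ∧ pvOk (start + s) nums) := by
  induction nums with
  | nil => intro start s m; simp [pvOk]
  | cons x xs ih =>
    intro start s m
    simp only [List.foldl, pvOk]
    rw [ih]
    split <;> rename_i h <;> constructor
    · rintro ⟨h1, h2⟩
      refine ⟨by omega, by omega, ?_⟩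
      have : start + (s + x) = start + s + x := by ring
      rwa [← this]
    · rintro ⟨h1, h2, h3⟩
      refine ⟨by omega, ?_⟩
      have : start + s + x = start + (s + x) := by ring
      rwa [this] at h3
    · rintro ⟨h1, h2⟩
      refine ⟨h1, by omega, ?_⟩
      have : start + (s + x) = start + s + x := by ring
      rwa [← this]
    · rintro ⟨h1, h2, h3⟩
      refine ⟨h1, ?_⟩
      have : start + s + x = start + (s + x) := by ring
      rwa [this] at h3

theorem pvFold_snd_le (nums : List Int) : ∀ (s m : Int),
    (nums.foldl (fun (p : Int × Int) x =>
      (p.1 + x, if p.1 + x < p.2 then p.1 + x else p.2)) (s, m)).2 ≤ m := by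
  induction nums with
  | nil => intro s m; simp
  | cons x xs ih =>
    intro s m
    simp only [List.foldl]
    refine (ih _ _).trans ?_
    split <;> omega

theorem pvMin_nonpos (nums : List Int) : pvMin nums ≤ 0 := pvFold_snd_le nums 0 0

theorem pvNotOk_lt (nums : List Int) (start : Int) (h : ¬ pvOk start nums) :
    start + pvMin nums < 1 := by
  by_cases hs : start ≤ 0
  · have := pvMin_nonpos nums; omega
  · by_contra hc
    have h1 : (1:Int) ≤ start + (nums.foldl (fun (p : Int × Int) x =>
        (p.1 + x, if p.1 + x < p.2 then p.1 + x else p.2)) (0, 0)).2 := by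
      unfold pvMin at hc; omega
    have h2 := ((pvMin_fold nums start 0 0).mp h1).2
    rw [add_zero] at h2
    exact h h2

-- the outer 'while True' loop of A: rebuild prefix from the current startValue; if the whole
-- list was built, return startValue, else startValue += 1 and retry
def pvLoop (nums : List Int) (start : Int) : Int :=
  if (pvInner [start] start nums).length = nums.length + 1 then start
  else pvLoop nums (start + 1)
termination_by (1 - pvMin nums - start).toNat
decreasing_by
  rename_i h
  have hok : ¬ pvOk start nums := by
    intro hk
    have hlen := (pvInner_len nums [start] start).mpr hk
    simp only [List.length_cons, List.length_nil] at hlen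
    exact h (by omega)
  have := pvNotOk_lt nums start hok
  omega

def minStartValue (nums : List Int) : Int := pvLoop nums 1

-- ===== PORT B =====
def minStartValue_alt (nums : List Int) : Int :=
  let p := nums.foldl (fun (p : Int × Int) x =>
    (p.1 + x, if p.1 + x < p.2 then p.1 + x else p.2)) (0, 0)
  max 1 (1 - p.2)

-- ===== PRECONDITION & SPEC =====
def Spec_minStartValue (nums : List Int) (out : Int) : Prop := out = minStartValue_alt nums
instance (nums : List Int) (out : Int) : Decidable (Spec_minStartValue nums out) := by unfold Spec_minStartValue; infer_instance

-- ===== CLAIM (what is proved, stated in full; the proofs are below) =====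
def Claim_equal_minStartValue : Prop := ∀ (nums : List Int), Dom_minStartValue nums → Spec_minStartValue nums (minStartValue nums)

-- ===== LEMMAS AND PROOFS =====

theorem pvLoop_eq (nums : List Int) : ∀ (start : Int),
    1 ≤ start → pvLoop nums start = max start (1 - pvMin nums) := by
  refine pvLoop.induct nums
    (fun start => 1 ≤ start → pvLoop nums start = max start (1 - pvMin nums)) ?_ ?_
  · intro start h hs
    rw [pvLoop, if_pos h]
    have hok : pvOk start nums := by
      have := (pvInner_len nums [start] start)
      simp only [List.length_cons, List.length_nil] at this
      exact this.mp (by omega)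
    have h1 := (pvMin_fold nums start 0 0).mpr ⟨by omega, by rwa [add_zero]⟩
    unfold pvMin
    omega
  · intro start h ih hs
    rw [pvLoop, if_neg h]
    have hok : ¬ pvOk start nums := by
      intro hk
      have hlen := (pvInner_len nums [start] start).mpr hk
      simp only [List.length_cons, List.length_nil] at hlen
      exact h (by omega)
    have hlt := pvNotOk_lt nums start hok
    rw [ih (by omega)]
    omega

-- ===== VERDICT (by name: the statement is the Claim_ definition above) =====
theorem minStartValue_spec : Claim_equal_minStartValue := by
  intro nums _
  unfold Spec_minStartValue minStartValue
  rw [pvLoop_eq nums 1 le_rfl]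
  rfl
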